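-- pv_equiv track=rewrite | github.com/mslitao/Leetcode | word-breaker.py | breakWords
-- ===== SOURCE A (Python) =====
-- def breakWords(header):
--   words = []
--   n = len(header)
--   s = 0
--   for i in range(n):
--     word = ''
--     if((header[i] == '_' or header[i] == ' ' or header[i] == '.')  and i >= s):
--       word = header[s:i]
--       s = i + 1
--     elif(i == (n -1) and i >= s):
--       word = header[s:]
--     elif(header[i].isupper() and i >=s):
--       word = header[s:i]
--       s = i
--     word = word.rstrip('1234567890.')
--     if(len(word) > 0):
--       words.append(word.lower())
--
--   return words
-- ===== SOURCE B (Python) =====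
-- def _emit(words, w):
--     w = w.rstrip('1234567890.')
--     if w:
--         words.append(w.lower())
--
--
-- def breakWords(header):
--     words = []
--     buf = ''
--     n = len(header)
--     for i, ch in enumerate(header):
--         if ch == '_' or ch == ' ' or ch == '.':
--             _emit(words, buf)
--             buf = ''
--         elif i == n - 1:
--             _emit(words, buf + ch)
--         elif ch.isupper():
--             _emit(words, buf)
--             buf = ch
--         else:
--             buf += ch
--     return words
-- ===== Notes on version B (the rewrite author's own statement) =====
-- stated objective: idiomatic
-- what changed: Replaced the start-index/slice bookkeeping (word = header[s:i] recomputed from indices each iteration) by a character-accumulating tokenizer that keeps a running buffer and an emit helper, with no slicing and no index state.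
import Mathlib
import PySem

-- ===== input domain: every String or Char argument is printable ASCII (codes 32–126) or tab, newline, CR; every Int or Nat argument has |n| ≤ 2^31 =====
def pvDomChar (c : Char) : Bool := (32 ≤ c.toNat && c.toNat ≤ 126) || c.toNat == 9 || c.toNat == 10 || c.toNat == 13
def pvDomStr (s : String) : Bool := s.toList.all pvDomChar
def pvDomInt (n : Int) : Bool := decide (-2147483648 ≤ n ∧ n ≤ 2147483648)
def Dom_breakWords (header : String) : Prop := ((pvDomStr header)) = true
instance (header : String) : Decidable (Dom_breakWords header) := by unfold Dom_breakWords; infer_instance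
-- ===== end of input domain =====

-- B replaces A's start-index/slice bookkeeping by a buffer-accumulating tokenizer with an emit helper (idiomatic; same behaviour).

-- hand port of w.rstrip('1234567890.') (PySem has no rstrip-with-chars): drop trailing chars of that set; exact
def pvRstrip (w : List Char) : List Char :=
  (w.reverse.dropWhile (fun c => c ∈ ['1','2','3','4','5','6','7','8','9','0','.'])).reverse

-- ===== PORT A =====
def aStep (cs : List Char) (n : Int) (st : Int × List String) (i : Int) : Int × List String :=
  let s := st.1
  let word_s : List Char × Int :=
    if (PySem.List.pyGetD cs i ' ' = '_' ∨ PySem.List.pyGetD cs i ' ' = ' ' ∨ PySem.List.pyGetD cs i ' ' = '.') ∧ s ≤ i then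
      (PySem.List.slice cs (some s) (some i), i + 1)
    else if i = n - 1 ∧ s ≤ i then
      (PySem.List.slice cs (some s) none, s)
    else if PySem.Chars.isupper (PySem.List.pyGetD cs i ' ') = true ∧ s ≤ i then
      (PySem.List.slice cs (some s) (some i), i)
    else ([], s)
  let word := pvRstrip word_s.1
  if 0 < word.length then (word_s.2, st.2 ++ [String.mk (PySem.Chars.lower word)])
  else (word_s.2, st.2)

def breakWords (header : String) : List String :=
  let cs := header.toList
  let n := PySem.Chars.len cs
  ((PySem.List.pyRange 0 n 1).foldl (aStep cs n) (0, [])).2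

-- ===== PORT B =====
def emitB (words : List String) (w : List Char) : List String :=
  let w2 := pvRstrip w
  if 0 < w2.length then words ++ [String.mk (PySem.Chars.lower w2)] else words

def bStep (n : Nat) (st : List Char × List String) (p : Int × Char) : List Char × List String :=
  if p.2 = '_' ∨ p.2 = ' ' ∨ p.2 = '.' then ([], emitB st.2 st.1)
  else if p.1 = (n : Int) - 1 then (st.1, emitB st.2 (st.1 ++ [p.2]))
  else if PySem.Chars.isupper p.2 = true then ([p.2], emitB st.2 st.1)
  else (st.1 ++ [p.2], st.2)

def breakWords_alt (header : String) : List String :=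
  let cs := header.toList
  ((PySem.List.enumerate cs).foldl (bStep cs.length) ([], [])).2

-- ===== PRECONDITION & SPEC =====
def Spec_breakWords (header : String) (out : List String) : Prop := out = breakWords_alt header
instance (header : String) (out : List String) : Decidable (Spec_breakWords header out) := by unfold Spec_breakWords; infer_instance

-- ===== CLAIM (what is proved, stated in full; the proofs are below) =====
def Claim_equal_breakWords : Prop := ∀ (header : String), Dom_breakWords header → Spec_breakWords header (breakWords header)

-- ===== LEMMAS AND PROOFS =====

lemma emit_pair (words : List String) (w : List Char) (s2 : Int) :
    (if 0 < (pvRstrip w).length then (s2, words ++ [String.mk (PySem.Chars.lower (pvRstrip w))])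
     else (s2, words)) = (s2, emitB words w) := by
  simp only [emitB]
  split <;> rfl

lemma aStep_sep (cs : List Char) (n : Int) (st : Int × List String) (i : Int)
    (h1 : (PySem.List.pyGetD cs i ' ' = '_' ∨ PySem.List.pyGetD cs i ' ' = ' ' ∨
           PySem.List.pyGetD cs i ' ' = '.') ∧ st.1 ≤ i) :
    aStep cs n st i = (i + 1, emitB st.2 (PySem.List.slice cs (some st.1) (some i))) := by
  simp only [aStep]
  rw [if_pos h1]
  exact emit_pair _ _ _

lemma aStep_last (cs : List Char) (n : Int) (st : Int × List String) (i : Int)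
    (h1 : ¬ ((PySem.List.pyGetD cs i ' ' = '_' ∨ PySem.List.pyGetD cs i ' ' = ' ' ∨
              PySem.List.pyGetD cs i ' ' = '.') ∧ st.1 ≤ i))
    (h2 : i = n - 1 ∧ st.1 ≤ i) :
    aStep cs n st i = (st.1, emitB st.2 (PySem.List.slice cs (some st.1) none)) := by
  simp only [aStep]
  rw [if_neg h1, if_pos h2]
  exact emit_pair _ _ _

lemma aStep_upper (cs : List Char) (n : Int) (st : Int × List String) (i : Int)
    (h1 : ¬ ((PySem.List.pyGetD cs i ' ' = '_' ∨ PySem.List.pyGetD cs i ' ' = ' ' ∨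
              PySem.List.pyGetD cs i ' ' = '.') ∧ st.1 ≤ i))
    (h2 : ¬ (i = n - 1 ∧ st.1 ≤ i))
    (h3 : PySem.Chars.isupper (PySem.List.pyGetD cs i ' ') = true ∧ st.1 ≤ i) :
    aStep cs n st i = (i, emitB st.2 (PySem.List.slice cs (some st.1) (some i))) := by
  simp only [aStep]
  rw [if_neg h1, if_neg h2, if_pos h3]
  exact emit_pair _ _ _

lemma aStep_plain (cs : List Char) (n : Int) (st : Int × List String) (i : Int)
    (h1 : ¬ ((PySem.List.pyGetD cs i ' ' = '_' ∨ PySem.List.pyGetD cs i ' ' = ' ' ∨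
              PySem.List.pyGetD cs i ' ' = '.') ∧ st.1 ≤ i))
    (h2 : ¬ (i = n - 1 ∧ st.1 ≤ i))
    (h3 : ¬ (PySem.Chars.isupper (PySem.List.pyGetD cs i ' ') = true ∧ st.1 ≤ i)) :
    aStep cs n st i = (st.1, st.2) := by
  simp only [aStep]
  rw [if_neg h1, if_neg h2, if_neg h3]
  rfl

lemma take_append_of_drop {α : Type} (l : List α) (m : Nat) (x : α) (t : List α)
    (h : l.drop m = x :: t) : l.take m ++ [x] = l.take (m + 1) := by
  have hx : l[m]? = some x := by
    have := @List.getElem?_drop _ l m 0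
    simpa [h] using this.symm
  simp [List.take_succ, hx]

lemma loop_eq (cs : List Char) : ∀ (rest : List Char) (k a : Nat) (words : List String),
    rest = cs.drop k → a ≤ k →
    ((PySem.List.pyRange (k : Int) ((cs.length : Int)) 1).foldl (aStep cs (cs.length : Int)) ((a : Int), words)).2
      = ((PySem.List.enumerate rest (k : Int)).foldl (bStep cs.length) ((cs.drop a).take (k - a), words)).2 := by
  intro rest
  induction rest with
  | nil =>
    intro k a words hrest _
    have hk : cs.length ≤ k := by
      have := congrArg List.length hrest
      simp at this; omega
    rw [PySem.List.pyRange_one_eq_nil (by exact_mod_cast hk)]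
    simp [PySem.List.enumerate]
  | cons c rest' ih =>
    intro k a words hrest hak
    have hklen : k < cs.length := by
      have := congrArg List.length hrest
      simp at this; omega
    have hget : PySem.List.pyGetD cs (k : Int) ' ' = c := by
      have hx : cs[k]? = some c := by
        have := @List.getElem?_drop _ cs k 0
        simpa [← hrest] using this.symm
      simp [PySem.List.pyGetD_natCast, List.getD, hx]
    rw [PySem.List.pyRange_one_cons (by exact_mod_cast hklen), PySem.List.enumerate_cons,
        List.foldl_cons, List.foldl_cons]
    have hai : ((a : Nat) : Int) ≤ ((k : Nat) : Int) := by exact_mod_cast hak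
    by_cases hsep : c = '_' ∨ c = ' ' ∨ c = '.'
    · -- separator branch in both
      rw [aStep_sep cs _ _ _ (by rw [hget]; exact ⟨hsep, hai⟩)]
      have hB : bStep cs.length ((cs.drop a).take (k - a), words) ((k : Int), c)
          = ([], emitB words ((cs.drop a).take (k - a))) := by
        simp [bStep, hsep]
      rw [hB]
      simp only [PySem.List.slice_natCast]
      have := ih (k + 1) (k + 1) (emitB words ((cs.drop a).take (k - a)))
        (by simpa using congrArg (List.drop 1) hrest) (le_refl _)
      push_cast at this ⊢
      simpa using this
    · rcases eq_or_ne rest' [] with hnil | hne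
      · -- last character, not a separator: branch 2 fires in both; remainder empty
        have hlen : k + 1 = cs.length := by
          have := congrArg List.length hrest
          simp [hnil] at this; omega
        have hlast : ((k : Nat) : Int) = ((cs.length : Nat) : Int) - 1 := by omega
        have hword : (cs.drop a).take (k - a) ++ [c] = cs.drop a := by
          have hd : (cs.drop a).drop (k - a) = [c] := by
            rw [List.drop_drop, show a + (k - a) = k from by omega, ← hrest, hnil]
          calc (cs.drop a).take (k - a) ++ [c]
              = (cs.drop a).take (k - a) ++ (cs.drop a).drop (k - a) := by rw [hd]
            _ = cs.drop a := List.take_append_drop _ _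
        rw [aStep_last cs _ _ _ (by rw [hget]; tauto) ⟨hlast, hai⟩]
        have hB : bStep cs.length ((cs.drop a).take (k - a), words) ((k : Int), c)
            = ((cs.drop a).take (k - a), emitB words (cs.drop a)) := by
          simp only [bStep]
          rw [if_neg hsep, if_pos hlast, hword]
        rw [hB, hnil]
        rw [PySem.List.pyRange_one_eq_nil (by omega)]
        simp [PySem.List.enumerate, PySem.List.slice_from_natCast]
      · have hklen1 : k + 1 < cs.length := by
          have := congrArg List.length hrest
          simp at this
          cases rest' with
          | nil => exact absurd rfl hne
          | cons _ _ => simp at this; omega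
        have hnotlast : ¬ (((k : Nat) : Int) = ((cs.length : Nat) : Int) - 1) := by omega
        have hdrop1 : rest' = cs.drop (k + 1) := by
          simpa using congrArg (List.drop 1) hrest
        by_cases hup : PySem.Chars.isupper c = true
        · -- uppercase branch in both
          rw [aStep_upper cs _ _ _ (by rw [hget]; tauto) (by tauto) (by rw [hget]; exact ⟨hup, hai⟩)]
          have hB : bStep cs.length ((cs.drop a).take (k - a), words) ((k : Int), c)
              = ([c], emitB words ((cs.drop a).take (k - a))) := by
            simp only [bStep]
            rw [if_neg hsep, if_neg hnotlast, if_pos hup]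
          rw [hB]
          simp only [PySem.List.slice_natCast]
          have hbuf : (cs.drop k).take 1 = [c] := by rw [← hrest]; rfl
          have := ih (k + 1) k (emitB words ((cs.drop a).take (k - a))) hdrop1 (by omega)
          rw [show k + 1 - k = 1 from by omega, hbuf] at this
          push_cast at this ⊢
          simpa using this
        · -- plain character: A emits nothing, B extends the buffer
          rw [aStep_plain cs _ _ _ (by rw [hget]; tauto) (by tauto) (by rw [hget]; tauto)]
          have hB : bStep cs.length ((cs.drop a).take (k - a), words) ((k : Int), c)
              = ((cs.drop a).take (k - a) ++ [c], words) := by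
            simp only [bStep]
            rw [if_neg hsep, if_neg hnotlast, if_neg hup]
          have hbuf : (cs.drop a).take (k - a) ++ [c] = (cs.drop a).take (k + 1 - a) := by
            have hd : (cs.drop a).drop (k - a) = c :: rest' := by
              rw [List.drop_drop, show a + (k - a) = k from by omega, ← hrest]
            rw [take_append_of_drop (cs.drop a) (k - a) c rest' hd,
                show k - a + 1 = k + 1 - a from by omega]
          rw [hB, hbuf]
          have := ih (k + 1) a words hdrop1 (by omega)
          push_cast at this ⊢
          simpa using this

-- ===== VERDICT (by name: the statement is the Claim_ definition above) =====
theorem breakWords_spec : Claim_equal_breakWords := by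
  intro header _
  unfold Spec_breakWords breakWords breakWords_alt
  have := loop_eq header.toList header.toList 0 0 [] (by simp) (le_refl 0)
  simpa [PySem.Chars.len] using this
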